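-- pv_equiv track=rewrite | github.com/Scardubu/goaldigger_footie | dashboard/components/unified_prediction_display.py | _determine_team_league
-- ===== SOURCE A (Python) =====
-- def _determine_team_league(team: str) -> str:
--     """Determine which league a team belongs to."""
--     leagues = {
--         "Premier League": ["Manchester City", "Arsenal", "Liverpool", "Chelsea", "Manchester United", "Tottenham"],
--         "La Liga": ["Real Madrid", "Barcelona", "Atletico Madrid", "Sevilla", "Real Sociedad", "Villarreal"],
--         "Bundesliga": ["Bayern Munich", "Borussia Dortmund", "RB Leipzig", "Bayer Leverkusen", "Union Berlin"],
--         "Serie A": ["AC Milan", "Inter Milan", "Juventus", "Napoli", "AS Roma", "Lazio"],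
--         "Ligue 1": ["PSG", "Marseille", "Monaco", "Lyon", "Lille", "Rennes"],
--         "Eredivisie": ["Ajax", "PSV", "Feyenoord", "AZ Alkmaar", "FC Utrecht", "Vitesse"]
--     }
--
--     for league, teams in leagues.items():
--         if team in teams:
--             return league
--     return "Unknown League"
-- ===== SOURCE B (Python) =====
-- # Flat team -> league index written out directly; the answer is one dict lookup,
-- # no scan over per-league membership lists.
-- _TEAM_TO_LEAGUE = {
--     "Manchester City": "Premier League", "Arsenal": "Premier League",
--     "Liverpool": "Premier League", "Chelsea": "Premier League",
--     "Manchester United": "Premier League", "Tottenham": "Premier League",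
--     "Real Madrid": "La Liga", "Barcelona": "La Liga",
--     "Atletico Madrid": "La Liga", "Sevilla": "La Liga",
--     "Real Sociedad": "La Liga", "Villarreal": "La Liga",
--     "Bayern Munich": "Bundesliga", "Borussia Dortmund": "Bundesliga",
--     "RB Leipzig": "Bundesliga", "Bayer Leverkusen": "Bundesliga",
--     "Union Berlin": "Bundesliga",
--     "AC Milan": "Serie A", "Inter Milan": "Serie A", "Juventus": "Serie A",
--     "Napoli": "Serie A", "AS Roma": "Serie A", "Lazio": "Serie A",
--     "PSG": "Ligue 1", "Marseille": "Ligue 1", "Monaco": "Ligue 1",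
--     "Lyon": "Ligue 1", "Lille": "Ligue 1", "Rennes": "Ligue 1",
--     "Ajax": "Eredivisie", "PSV": "Eredivisie", "Feyenoord": "Eredivisie",
--     "AZ Alkmaar": "Eredivisie", "FC Utrecht": "Eredivisie", "Vitesse": "Eredivisie",
-- }
--
--
-- def _determine_team_league(team: str) -> str:
--     """Determine which league a team belongs to."""
--     return _TEAM_TO_LEAGUE.get(team, "Unknown League")
-- ===== Notes on version B (the rewrite author's own statement) =====
-- stated objective: idiomatic
-- what changed: Replaces the per-call scan over each league's member list with a flat team-to-league dict literal looked up directly, with the same default for unknown teams.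
import Mathlib
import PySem

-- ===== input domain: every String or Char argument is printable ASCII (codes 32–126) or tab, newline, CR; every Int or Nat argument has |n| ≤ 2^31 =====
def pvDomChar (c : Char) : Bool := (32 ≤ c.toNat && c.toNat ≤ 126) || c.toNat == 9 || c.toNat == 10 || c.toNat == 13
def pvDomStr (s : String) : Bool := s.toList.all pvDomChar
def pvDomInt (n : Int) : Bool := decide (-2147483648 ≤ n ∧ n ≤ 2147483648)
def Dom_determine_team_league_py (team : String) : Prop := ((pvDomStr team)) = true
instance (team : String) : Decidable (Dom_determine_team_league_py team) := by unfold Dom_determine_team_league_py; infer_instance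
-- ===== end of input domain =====

-- B replaces A's per-call scan over each league's member list with a flat
-- team→league dict literal answered by one lookup (objective: idiomatic).

-- ===== PORT A =====
-- the leagues dict literal (insertion order)
def pvLeagues : List (String × List String) :=
  [ ("Premier League", ["Manchester City", "Arsenal", "Liverpool", "Chelsea", "Manchester United", "Tottenham"]),
    ("La Liga", ["Real Madrid", "Barcelona", "Atletico Madrid", "Sevilla", "Real Sociedad", "Villarreal"]),
    ("Bundesliga", ["Bayern Munich", "Borussia Dortmund", "RB Leipzig", "Bayer Leverkusen", "Union Berlin"]),
    ("Serie A", ["AC Milan", "Inter Milan", "Juventus", "Napoli", "AS Roma", "Lazio"]),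
    ("Ligue 1", ["PSG", "Marseille", "Monaco", "Lyon", "Lille", "Rennes"]),
    ("Eredivisie", ["Ajax", "PSV", "Feyenoord", "AZ Alkmaar", "FC Utrecht", "Vitesse"]) ]

-- 'for league, teams in leagues.items(): if team in teams: return league' / 'return "Unknown League"'
def pvScanLeagues (team : String) : List (String × List String) → String
  | [] => "Unknown League"
  | (league, teams) :: rest => if teams.contains team then league else pvScanLeagues team rest

def determine_team_league_py (team : String) : String := pvScanLeagues team pvLeagues

-- ===== PORT B =====
-- the flat dict literal _TEAM_TO_LEAGUE (all keys distinct)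
def pvTeamToLeague : PySem.Dict String String := PySem.Dict.mk
  [ ("Manchester City", "Premier League"), ("Arsenal", "Premier League"),
    ("Liverpool", "Premier League"), ("Chelsea", "Premier League"),
    ("Manchester United", "Premier League"), ("Tottenham", "Premier League"),
    ("Real Madrid", "La Liga"), ("Barcelona", "La Liga"),
    ("Atletico Madrid", "La Liga"), ("Sevilla", "La Liga"),
    ("Real Sociedad", "La Liga"), ("Villarreal", "La Liga"),
    ("Bayern Munich", "Bundesliga"), ("Borussia Dortmund", "Bundesliga"),
    ("RB Leipzig", "Bundesliga"), ("Bayer Leverkusen", "Bundesliga"),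
    ("Union Berlin", "Bundesliga"),
    ("AC Milan", "Serie A"), ("Inter Milan", "Serie A"), ("Juventus", "Serie A"),
    ("Napoli", "Serie A"), ("AS Roma", "Serie A"), ("Lazio", "Serie A"),
    ("PSG", "Ligue 1"), ("Marseille", "Ligue 1"), ("Monaco", "Ligue 1"),
    ("Lyon", "Ligue 1"), ("Lille", "Ligue 1"), ("Rennes", "Ligue 1"),
    ("Ajax", "Eredivisie"), ("PSV", "Eredivisie"), ("Feyenoord", "Eredivisie"),
    ("AZ Alkmaar", "Eredivisie"), ("FC Utrecht", "Eredivisie"), ("Vitesse", "Eredivisie") ]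

def determine_team_league_py_alt (team : String) : String :=
  PySem.Dict.getD pvTeamToLeague team "Unknown League"

-- ===== PRECONDITION & SPEC =====
def Spec_determine_team_league_py (team : String) (out : String) : Prop := out = determine_team_league_py_alt team
instance (team : String) (out : String) : Decidable (Spec_determine_team_league_py team out) := by unfold Spec_determine_team_league_py; infer_instance

-- ===== CLAIM (what is proved, stated in full; the proofs are below) =====
def Claim_equal_determine_team_league_py : Prop := ∀ (team : String), Dom_determine_team_league_py team → Spec_determine_team_league_py team (determine_team_league_py team)

-- ===== LEMMAS AND PROOFS =====

-- first-match lookup in a flat (team, league) list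
def pvFlatGet (team : String) : List (String × String) → String
  | [] => "Unknown League"
  | (t, l) :: rest => if t == team then l else pvFlatGet team rest

-- B's dict literal holds exactly A's data, flattened in scan order
set_option maxRecDepth 4000 in
theorem pvTeamToLeague_eq :
    pvTeamToLeague = PySem.Dict.mk (pvLeagues.flatMap (fun p => p.2.map (fun t => (t, p.1)))) := by
  decide

theorem pvDict_getD_eq (team : String) (ps : List (String × String)) :
    (PySem.Dict.mk ps).getD team "Unknown League" = pvFlatGet team ps := by
  induction ps with
  | nil =>
      simp [PySem.Dict.getD_eq_get?_getD, pvFlatGet]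
      rfl
  | cons p rest ih =>
      obtain ⟨t, l⟩ := p
      rw [PySem.Dict.getD_eq_get?_getD, PySem.Dict.get?_mk_cons, pvFlatGet]
      by_cases h : t == team
      · simp [h]
      · simp only [h, Bool.false_eq_true, ite_false]
        rw [← PySem.Dict.getD_eq_get?_getD]
        exact ih

theorem pvFlatGet_append (team : String) (l : String) (ts : List String)
    (rest : List (String × String)) :
    pvFlatGet team (ts.map (fun t => (t, l)) ++ rest) =
      if ts.contains team then l else pvFlatGet team rest := by
  induction ts with
  | nil => simp
  | cons t ts ih =>
      by_cases h : t = team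
      · subst h
        simp [pvFlatGet]
      · simp [pvFlatGet, h, ih, Ne.symm h]

theorem pvScan_eq_flatGet (team : String) (ls : List (String × List String)) :
    pvScanLeagues team ls = pvFlatGet team (ls.flatMap (fun p => p.2.map (fun t => (t, p.1)))) := by
  induction ls with
  | nil => simp [pvScanLeagues, pvFlatGet]
  | cons p rest ih =>
      obtain ⟨l, ts⟩ := p
      simp only [pvScanLeagues, List.flatMap_cons, pvFlatGet_append, ih]

theorem pv_eq (team : String) :
    determine_team_league_py team = determine_team_league_py_alt team := by
  unfold determine_team_league_py determine_team_league_py_alt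
  rw [pvTeamToLeague_eq, pvDict_getD_eq, pvScan_eq_flatGet]

-- ===== VERDICT (by name: the statement is the Claim_ definition above) =====
theorem determine_team_league_py_spec : Claim_equal_determine_team_league_py := by
  intro team _
  unfold Spec_determine_team_league_py
  exact pv_eq team
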